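-- pv_equiv track=rewrite | github.com/Prosono/HomeGPT | homegpt/api/main.py | clamp_chars
-- ===== SOURCE A (Python) =====
-- def clamp_chars(text: str, max_chars: int) -> str:
--     """Trim on line boundaries to max_chars and annotate if truncated."""
--     t = text or ""
--     if len(t) <= max_chars:
--         return t
--     used = 0
--     out: list[str] = []
--     for line in t.splitlines():
--         ln = len(line) + 1
--         if used + ln > max_chars:
--             break
--         out.append(line)
--         used += ln
--     out.append("… [truncated]")
--     return "\n".join(out)
-- ===== SOURCE B (Python) =====
-- def clamp_chars(text: str, max_chars: int) -> str:
--     """Trim on line boundaries to max_chars and annotate if truncated."""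
--     t = text or ""
--     if len(t) <= max_chars:
--         return t
--     lines = t.splitlines()
--     c = 0
--     cum = [(c := c + len(l) + 1) for l in lines]
--     kept = [l for l, s in zip(lines, cum) if s <= max_chars]
--     return "\n".join(kept + ["… [truncated]"])
-- ===== Notes on version B (the rewrite author's own statement) =====
-- stated objective: idiomatic
-- what changed: Replaces the break-out accumulator loop by prefix sums over the split lines plus a zip/filter comprehension (valid because the cumulative sums are strictly increasing, so filtering coincides with the loop's break).
import Mathlib
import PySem

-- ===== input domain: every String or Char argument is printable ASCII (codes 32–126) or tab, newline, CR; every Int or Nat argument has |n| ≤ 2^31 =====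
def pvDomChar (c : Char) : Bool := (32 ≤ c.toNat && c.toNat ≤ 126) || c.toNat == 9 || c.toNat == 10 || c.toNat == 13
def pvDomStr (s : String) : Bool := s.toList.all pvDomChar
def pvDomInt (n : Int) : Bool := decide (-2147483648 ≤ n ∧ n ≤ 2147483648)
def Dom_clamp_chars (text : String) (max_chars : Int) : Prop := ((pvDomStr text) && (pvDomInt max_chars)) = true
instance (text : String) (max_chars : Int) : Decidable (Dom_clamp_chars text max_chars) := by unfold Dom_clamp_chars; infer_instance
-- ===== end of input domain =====

-- B replaces A's break-out accumulator loop by prefix sums plus a zip/filter comprehension (idiomatic; same cost).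

-- ===== PORT A =====
-- the for-loop with break: structural recursion over the lines, carrying `used`
def clampLoopA (max_chars : Int) : List String → Int → List String
  | [], _ => []
  | line :: rest, used =>
    let ln := PySem.Str.len line + 1
    if used + ln > max_chars then []
    else line :: clampLoopA max_chars rest (used + ln)

def clamp_chars (text : String) (max_chars : Int) : String :=
  let t := text  -- `text or ""` = text for strings
  if PySem.Str.len t ≤ max_chars then t
  else
    let out := clampLoopA max_chars (PySem.Str.splitlines t) 0
    PySem.Str.join "\n" (out ++ ["… [truncated]"])

-- ===== PORT B =====
-- the walrus comprehension: running prefix sums of len(l)+1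
def cumAlt : List String → Int → List Int
  | [], _ => []
  | l :: ls, c => (c + (PySem.Str.len l + 1)) :: cumAlt ls (c + (PySem.Str.len l + 1))

def clamp_chars_alt (text : String) (max_chars : Int) : String :=
  let t := text
  if PySem.Str.len t ≤ max_chars then t
  else
    let lines := PySem.Str.splitlines t
    let cum := cumAlt lines 0
    let kept := ((lines.zip cum).filter (fun p => p.2 ≤ max_chars)).map (·.1)
    PySem.Str.join "\n" (kept ++ ["… [truncated]"])

-- ===== PRECONDITION & SPEC =====
def Spec_clamp_chars (text : String) (max_chars : Int) (out : String) : Prop := out = clamp_chars_alt text max_chars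
instance (text : String) (max_chars : Int) (out : String) : Decidable (Spec_clamp_chars text max_chars out) := by unfold Spec_clamp_chars; infer_instance

-- ===== CLAIM (what is proved, stated in full; the proofs are below) =====
def Claim_equal_clamp_chars : Prop := ∀ (text : String) (max_chars : Int), Dom_clamp_chars text max_chars → Spec_clamp_chars text max_chars (clamp_chars text max_chars)

-- ===== LEMMAS AND PROOFS =====

lemma cumAlt_gt (ls : List String) (c : Int) : ∀ x ∈ cumAlt ls c, c < x := by
  induction ls generalizing c with
  | nil => simp [cumAlt]
  | cons l ls ih =>
    intro x hx
    have hlen : 0 ≤ PySem.Str.len l := by simp [PySem.Str.len_eq]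
    rcases List.mem_cons.mp hx with h | h
    · omega
    · have := ih _ x h; omega

lemma loop_eq_filter (max_chars : Int) (ls : List String) (used : Int) :
    clampLoopA max_chars ls used =
      ((ls.zip (cumAlt ls used)).filter (fun p => p.2 ≤ max_chars)).map (·.1) := by
  induction ls generalizing used with
  | nil => simp [clampLoopA, cumAlt]
  | cons l ls ih =>
    by_cases h : max_chars < used + ((l.length : Int) + 1)
    · have hrest : (List.filter (fun p => decide (p.2 ≤ max_chars))
          (ls.zip (cumAlt ls (used + ((l.length : Int) + 1))))) = [] := by
        apply List.filter_eq_nil_iff.mpr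
        intro p hp
        have := cumAlt_gt ls (used + ((l.length : Int) + 1)) p.2 (List.of_mem_zip hp).2
        simp only [decide_eq_true_eq]
        omega
      have h' : ¬ (used + ((l.length : Int) + 1) ≤ max_chars) := by omega
      simp [clampLoopA, cumAlt, h, hrest]
    · have h' : used + ((l.length : Int) + 1) ≤ max_chars := by omega
      simp [clampLoopA, cumAlt, h, h', ih]

-- ===== VERDICT (by name: the statement is the Claim_ definition above) =====
theorem clamp_chars_spec : Claim_equal_clamp_chars := by
  intro text max_chars _
  unfold Spec_clamp_chars clamp_chars clamp_chars_alt
  simp only [PySem.Str.len_eq]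
  by_cases h : (text.length : Int) ≤ max_chars
  · simp [if_pos h]
  · simp [if_neg h, loop_eq_filter]
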